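-- pv_equiv track=rewrite | github.com/ang-cai/conform | conform.py | please_flip_one_pass
-- ===== SOURCE A (Python) =====
-- def please_flip_one_pass(caps:list)->list:
--   """
--     Generates a minimal list of shouts needed to have all fan caps face the same direction using exactly 1 for loop
--
--       Args:
--       caps: list of strings which are either 'F' (Forward) or 'B' (Backward)
--
--       Return:
--       a list of shouts, which could be empty if the list of caps is either empty or all the same direction
--   """
--   intervals = []
--   interval_start = 0
--   shouts = []
--   new_caps = caps.copy()
--   new_caps.append("end")
--
--   if new_caps[interval_start] == 'B':
--     flip_direction = 'F'
--   else:
--     flip_direction = 'B'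
--
--   for i in range(1, len(new_caps)):
--     if new_caps[interval_start] != new_caps[i]:
--       intervals.append((interval_start, i - 1, new_caps[interval_start])) #(start, end, direction)
--
--       if new_caps[interval_start] == flip_direction and interval_start != i-1:
--         shouts.append(f"People in positions {interval_start} through {i - 1} flip your caps!")
--       elif new_caps[interval_start] == flip_direction:
--         shouts.append(f"Person in position {interval_start} flip your cap!")
--
--       interval_start = i   #new hat direction->new interval start
--
--   return shouts
-- ===== SOURCE B (Python) =====
-- def _shout(start, end):
--     if start != end:
--         return f"People in positions {start} through {end} flip your caps!"
--     return f"Person in position {start} flip your cap!"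
--
--
-- def please_flip_one_pass(caps: list) -> list:
--     """Different strategy: instead of run-length encoding the caps, collect the
--     POSITIONS whose cap faces the flip direction, then merge consecutive
--     positions into intervals (gap detection on integers) and shout each one."""
--     flip = 'F' if caps and caps[0] == 'B' else 'B'
--     flip_idx = [i for i, c in enumerate(caps) if c == flip]
--     shouts = []
--     cur = None                      # open interval (start, end) of consecutive positions
--     for i in flip_idx:
--         if cur is not None and i == cur[1] + 1:
--             cur = (cur[0], i)
--         else:
--             if cur is not None:
--                 shouts.append(_shout(*cur))
--             cur = (i, i)
--     if cur is not None:
--         shouts.append(_shout(*cur))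
--     return shouts
-- ===== Notes on version B (the rewrite author's own statement) =====
-- stated objective: alternative
-- what changed: A run-length encodes the cap values in one sentinel-terminated scan comparing adjacent caps; B never compares adjacent caps: it first collects the integer positions facing the flip direction, then merges consecutive positions into intervals by gap detection on the index numbers.
import Mathlib
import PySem

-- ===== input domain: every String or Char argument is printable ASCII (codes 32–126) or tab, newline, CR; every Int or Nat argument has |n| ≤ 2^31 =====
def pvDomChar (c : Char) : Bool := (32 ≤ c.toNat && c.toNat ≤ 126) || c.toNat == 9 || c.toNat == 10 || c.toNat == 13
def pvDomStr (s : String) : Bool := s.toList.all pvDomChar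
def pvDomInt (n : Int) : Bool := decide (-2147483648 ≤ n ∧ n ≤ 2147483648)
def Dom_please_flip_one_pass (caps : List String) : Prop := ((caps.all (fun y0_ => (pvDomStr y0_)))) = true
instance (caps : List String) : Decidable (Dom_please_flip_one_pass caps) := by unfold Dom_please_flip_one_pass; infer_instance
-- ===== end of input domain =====

-- B replaces A's sentinel scan over adjacent cap values by a different strategy:
-- collect the integer positions facing the flip direction, then merge consecutive
-- positions into intervals by gap detection (alternative algorithm, same cost).

-- message helpers (the f-string texts both Pythons produce)
def pvPeopleMsg (s e : Int) : String :=
  "People in positions " ++ PySem.Int.toStr s ++ " through " ++ PySem.Int.toStr e ++ " flip your caps!"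
def pvPersonMsg (s : Int) : String :=
  "Person in position " ++ PySem.Int.toStr s ++ " flip your cap!"

-- ===== PORT A =====
-- loop body of A's single for-loop; state = (interval_start, intervals, shouts)
def pvBodyA (nc : List String) (flip : String)
    (st : Int × List (Int × Int × String) × List String) (i : Int) :
    Int × List (Int × Int × String) × List String :=
  if PySem.List.pyGetD nc st.1 "" ≠ PySem.List.pyGetD nc i "" then
    let v := PySem.List.pyGetD nc st.1 ""
    (i, st.2.1 ++ [(st.1, i - 1, v)],
      if v = flip ∧ st.1 ≠ i - 1 then st.2.2 ++ [pvPeopleMsg st.1 (i - 1)]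
      else if v = flip then st.2.2 ++ [pvPersonMsg st.1]
      else st.2.2)
  else st

def please_flip_one_pass (caps : List String) : List String :=
  let new_caps := caps ++ ["end"]
  let flip := if PySem.List.pyGetD new_caps 0 "" = "B" then "F" else "B"
  ((PySem.List.pyRange 1 (new_caps.length : Int) 1).foldl (pvBodyA new_caps flip)
    (0, [], [])).2.2

-- ===== PORT B =====
-- _shout from Source B
def pvShout (s e : Int) : String :=
  if s ≠ e then pvPeopleMsg s e else pvPersonMsg s

-- loop body of B's for-loop over the flip positions; state = (shouts, open interval)
def pvBodyB (st : List String × Option (Int × Int)) (i : Int) :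
    List String × Option (Int × Int) :=
  match st.2 with
  | some (a, b) =>
    if i = b + 1 then (st.1, some (a, i))
    else (st.1 ++ [pvShout a b], some (i, i))
  | none => (st.1, some (i, i))

def please_flip_one_pass_alt (caps : List String) : List String :=
  let flip := match caps with
    | [] => "B"
    | c :: _ => if c = "B" then "F" else "B"
  let flip_idx := ((PySem.List.enumerate caps 0).filter (fun p => p.2 == flip)).map Prod.fst
  let st := flip_idx.foldl pvBodyB ([], none)
  match st.2 with
  | some (a, b) => st.1 ++ [pvShout a b]
  | none => st.1

-- ===== PRECONDITION & SPEC =====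
def Spec_please_flip_one_pass (caps : List String) (out : List String) : Prop := out = please_flip_one_pass_alt caps
instance (caps : List String) (out : List String) : Decidable (Spec_please_flip_one_pass caps out) := by unfold Spec_please_flip_one_pass; infer_instance

-- ===== CLAIM =====
def Claim_equal_please_flip_one_pass : Prop := ∀ (caps : List String), Dom_please_flip_one_pass caps → Spec_please_flip_one_pass caps (please_flip_one_pass caps)

-- ===== LEMMAS AND PROOFS =====
set_option maxRecDepth 8192

-- A's loop, structurally: current run starts at s with value v, next index j
def pvShoutsGo (flip : String) (s : Int) (v : String) (j : Int) : List String → List String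
  | [] => []
  | c :: rest =>
    if v ≠ c then
      (if v = flip ∧ s ≠ j - 1 then [pvPeopleMsg s (j - 1)]
       else if v = flip then [pvPersonMsg s]
       else [])
        ++ pvShoutsGo flip j c (j + 1) rest
    else pvShoutsGo flip s v (j + 1) rest

-- positions (from offset s) whose cap equals flip
def pvIdxGo (flip : String) (s : Int) : List String → List Int
  | [] => []
  | c :: rest => if c = flip then s :: pvIdxGo flip (s + 1) rest else pvIdxGo flip (s + 1) rest

-- B's gap-merging loop, structurally, with an open interval (a, b)
def pvEmit (a b : Int) : List Int → List String
  | [] => [pvShout a b]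
  | i :: t => if i = b + 1 then pvEmit a i t else pvShout a b :: pvEmit i i t

def pvEmitAll : List Int → List String
  | [] => []
  | i :: t => pvEmit i i t

theorem pv_getD_append (p t : List String) (v : String) :
    PySem.List.pyGetD (p ++ v :: t) ((p.length : Nat) : Int) "" = v := by
  simp [PySem.List.pyGetD_natCast, List.getD_eq_getElem?_getD]

-- the index-driven fold of A equals the structural run walk
theorem pv_loopA (flip : String) (L : List String) (rest : List String) :
    ∀ (M P : List String) (v : String) (j : Int), (∀ x ∈ M, x = v) →
    L = P ++ v :: (M ++ rest) → j = (P.length : Int) + 1 + (M.length : Int) →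
    ∀ (iv : List (Int × Int × String)) (sh : List String),
    ((PySem.List.pyRange j (L.length : Int) 1).foldl (pvBodyA L flip)
      ((P.length : Int), iv, sh)).2.2
    = sh ++ pvShoutsGo flip (P.length : Int) v j rest := by
  induction rest with
  | nil =>
    intro M P v j hM hL hj iv sh
    have hlen : (L.length : Int) = j := by subst hL; simp; omega
    rw [hlen, PySem.List.pyRange_one_eq_nil (le_refl j)]
    simp [pvShoutsGo]
  | cons c rest' ih =>
    intro M P v j hM hL hj iv sh
    have hjlt : j < (L.length : Int) := by subst hL; simp; omega
    rw [PySem.List.pyRange_one_cons hjlt, List.foldl_cons]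
    have hs : PySem.List.pyGetD L ((P.length : Nat) : Int) "" = v := by
      rw [hL]; exact pv_getD_append P (M ++ c :: rest') v
    have hL' : L = (P ++ v :: M) ++ c :: rest' := by rw [hL]; simp
    have hj' : j = (((P ++ v :: M).length : Nat) : Int) := by simp; omega
    have hc : PySem.List.pyGetD L j "" = c := by
      rw [hL', hj']; exact pv_getD_append (P ++ v :: M) rest' c
    by_cases hvc : v = c
    · have : pvBodyA L flip ((P.length : Int), iv, sh) j = ((P.length : Int), iv, sh) := by
        simp [pvBodyA, hs, hc, hvc]
      rw [this]
      have hM' : ∀ x ∈ M ++ [c], x = v := by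
        intro x hx
        rcases List.mem_append.mp hx with h | h
        · exact hM x h
        · simp at h; rw [h, hvc]
      rw [ih (M ++ [c]) P v (j + 1) hM' (by rw [hL]; simp) (by simp; omega) iv sh]
      subst hvc
      have h1 : pvShoutsGo flip (↑P.length) v j (v :: rest') = pvShoutsGo flip (↑P.length) v (j + 1) rest' := by
        simp [pvShoutsGo]
      rw [h1]
    · have hb : pvBodyA L flip ((P.length : Int), iv, sh) j =
          (j, iv ++ [((P.length : Int), j - 1, v)],
            sh ++ (if v = flip ∧ (P.length : Int) ≠ j - 1 then [pvPeopleMsg (P.length : Int) (j - 1)]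
                   else if v = flip then [pvPersonMsg (P.length : Int)]
                   else [])) := by
        simp only [pvBodyA, hs, hc]
        simp [hvc]
        split_ifs <;> simp
      rw [hb]
      have hrec := ih [] (P ++ v :: M) c (j + 1) (by intro x hx; simp at hx)
          (by rw [hL]; simp) (by simp; omega)
          (iv ++ [((P.length : Int), j - 1, v)])
          (sh ++ (if v = flip ∧ (P.length : Int) ≠ j - 1 then [pvPeopleMsg (P.length : Int) (j - 1)]
                  else if v = flip then [pvPersonMsg (P.length : Int)]
                  else []))
      rw [hj'] at hrec ⊢
      rw [hrec]
      simp [pvShoutsGo, hvc, List.append_assoc]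

-- skipping an initial run of equal caps just advances the index
theorem pv_shoutsGo_run (flip v : String) (M : List String) (hM : ∀ x ∈ M, x = v) :
    ∀ (s j : Int) (rest : List String),
    pvShoutsGo flip s v j (M ++ rest) = pvShoutsGo flip s v (j + (M.length : Int)) rest := by
  induction M with
  | nil => intro s j rest; simp
  | cons c M' ih =>
    intro s j rest
    have hv : c = v := hM c (by simp)
    subst hv
    have h1 : pvShoutsGo flip s c j ((c :: M') ++ rest) = pvShoutsGo flip s c (j + 1) (M' ++ rest) := by
      simp [pvShoutsGo]
    rw [h1, ih (fun x hx => hM x (by simp [hx])) s (j + 1) rest]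
    congr 1
    simp only [List.length_cons]
    push_cast
    ring

-- every collected position is at least the offset
theorem pv_idxGo_ge (flip : String) : ∀ (l : List String) (s x : Int),
    x ∈ pvIdxGo flip s l → s ≤ x := by
  intro l
  induction l with
  | nil => intro s x hx; simp [pvIdxGo] at hx
  | cons c t ih =>
    intro s x hx
    simp only [pvIdxGo] at hx
    split_ifs at hx with hc
    · rcases List.mem_cons.mp hx with h | h
      · omega
      · have := ih (s + 1) x h; omega
    · have := ih (s + 1) x hx; omega

-- skipping a run of non-flip caps collects nothing
theorem pv_idxGo_skip (flip v : String) (hv : v ≠ flip) (M : List String)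
    (hM : ∀ x ∈ M, x = v) : ∀ (s : Int) (r : List String),
    pvIdxGo flip s (M ++ r) = pvIdxGo flip (s + (M.length : Int)) r := by
  induction M with
  | nil => intro s r; simp
  | cons c M' ih =>
    intro s r
    have hc : c = v := hM c (by simp)
    have : pvIdxGo flip s ((c :: M') ++ r) = pvIdxGo flip (s + 1) (M' ++ r) := by
      simp [pvIdxGo, hc, hv]
    rw [this, ih (fun x hx => hM x (by simp [hx])) (s + 1) r]
    congr 1
    simp only [List.length_cons]
    push_cast
    ring

-- consuming a run of flip caps extends the open interval
theorem pv_emit_extend (flip : String) (M : List String)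
    (hM : ∀ x ∈ M, x = flip) : ∀ (s a : Int) (r : List String),
    pvEmit a s (pvIdxGo flip (s + 1) (M ++ r))
    = pvEmit a (s + (M.length : Int)) (pvIdxGo flip (s + 1 + (M.length : Int)) r) := by
  induction M with
  | nil => intro s a r; simp
  | cons c M' ih =>
    intro s a r
    have hc : c = flip := hM c (by simp)
    have h1 : pvIdxGo flip (s + 1) ((c :: M') ++ r) = (s + 1) :: pvIdxGo flip (s + 2) (M' ++ r) := by
      simp [pvIdxGo, hc]
      ring_nf
    rw [h1]
    have h2 : pvEmit a s ((s + 1) :: pvIdxGo flip (s + 2) (M' ++ r))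
        = pvEmit a (s + 1) (pvIdxGo flip (s + 2) (M' ++ r)) := by
      simp [pvEmit]
    rw [h2]
    have h3 := ih (fun x hx => hM x (by simp [hx])) (s + 1) a r
    have e1 : s + 1 + 1 = s + 2 := by ring
    rw [e1] at h3
    rw [h3]
    simp only [List.length_cons]
    push_cast
    ring_nf

-- a gap flushes the open interval
theorem pv_emit_flush (a b : Int) (L : List Int) (hL : ∀ x ∈ L, b + 1 < x) :
    pvEmit a b L = pvShout a b :: pvEmitAll L := by
  cases L with
  | nil => simp [pvEmit, pvEmitAll]
  | cons i t =>
    have : i ≠ b + 1 := by have := hL i (by simp); omega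
    simp [pvEmit, pvEmitAll, this]

-- the sentinel-terminated run walk equals B's gap-merging of the flip positions
theorem pv_bridge (flip : String) (hf : flip ≠ "end") (n : Nat) :
    ∀ (c : String) (rest : List String), (c :: rest).length ≤ n → ∀ (s : Int),
    pvShoutsGo flip s c (s + 1) (rest ++ ["end"])
    = pvEmitAll (pvIdxGo flip s (c :: rest)) := by
  induction n with
  | zero => intro c rest h; simp at h
  | succ n ih =>
    intro c rest hlen s
    obtain ⟨M, hMdef⟩ : ∃ M, rest.takeWhile (fun x => x == c) = M := ⟨_, rfl⟩
    obtain ⟨r, hrdef⟩ : ∃ r, rest.dropWhile (fun x => x == c) = r := ⟨_, rfl⟩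
    have hrest : rest = M ++ r := by rw [← hMdef, ← hrdef, List.takeWhile_append_dropWhile]
    have hM : ∀ x ∈ M, x = c := by
      intro x hx
      rw [← hMdef] at hx
      simpa using List.mem_takeWhile_imp hx
    have hskip : pvShoutsGo flip s c (s + 1) (rest ++ ["end"])
        = pvShoutsGo flip s c (s + 1 + (M.length : Int)) (r ++ ["end"]) := by
      conv_lhs => rw [hrest, List.append_assoc]
      exact pv_shoutsGo_run flip c M hM s (s + 1) (r ++ ["end"])
    have hidx : pvIdxGo flip s (c :: rest) = pvIdxGo flip s (c :: (M ++ r)) := by rw [hrest]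
    rw [hskip, hidx]
    by_cases hcf : c = flip
    · -- run of flip caps: open interval (s, s + |M|)
      have hMf : ∀ x ∈ M, x = flip := fun x hx => (hM x hx).trans hcf
      have h1 : pvIdxGo flip s (c :: (M ++ r)) = s :: pvIdxGo flip (s + 1) (M ++ r) := by
        simp [pvIdxGo, hcf]
      rw [h1]
      have h2 : pvEmitAll (s :: pvIdxGo flip (s + 1) (M ++ r))
          = pvEmit s s (pvIdxGo flip (s + 1) (M ++ r)) := by simp [pvEmitAll]
      rw [h2, pv_emit_extend flip M hMf s s r]
      cases r with
      | nil =>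
        have hLHS : pvShoutsGo flip s c (s + 1 + (M.length : Int)) ["end"]
            = (if c = flip ∧ s ≠ s + 1 + (M.length : Int) - 1 then
                [pvPeopleMsg s (s + 1 + (M.length : Int) - 1)]
              else if c = flip then [pvPersonMsg s]
              else []) := by
          have hce : c ≠ "end" := by rw [hcf]; exact hf
          simp [pvShoutsGo, hce]
        simp only [List.nil_append] at *
        rw [hLHS]
        have hR : pvIdxGo flip (s + 1 + (M.length : Int)) [] = ([] : List Int) := rfl
        rw [hR]
        simp only [pvEmit, pvShout, hcf]
        have he : s + 1 + (M.length : Int) - 1 = s + (M.length : Int) := by ring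
        rw [he]
        split_ifs <;> first | rfl | tauto
      | cons d r' =>
        have hd : (d == c) = false := by
          have h2' := List.head?_dropWhile_not (fun x => x == c) rest
          rw [hrdef] at h2'
          simpa using h2'
        have hdc : c ≠ d := by intro h; rw [h] at hd; simp at hd
        have hdf : d ≠ flip := by rw [← hcf]; intro h; rw [h] at hd; simp at hd
        have hlen' : (d :: r').length ≤ n := by
          have h1' : rest.length = M.length + (d :: r').length := by
            rw [hrest]; simp
          simp only [List.length_cons] at hlen h1' ⊢
          omega
        have hLHS : pvShoutsGo flip s c (s + 1 + (M.length : Int)) ((d :: r') ++ ["end"])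
            = (if c = flip ∧ s ≠ s + 1 + (M.length : Int) - 1 then
                [pvPeopleMsg s (s + 1 + (M.length : Int) - 1)]
              else if c = flip then [pvPersonMsg s]
              else [])
              ++ pvShoutsGo flip (s + 1 + (M.length : Int)) d (s + 1 + (M.length : Int) + 1)
                  (r' ++ ["end"]) := by
          simp [pvShoutsGo, hdc]
        rw [hLHS, ih d r' hlen' (s + 1 + (M.length : Int))]
        have hge : ∀ x ∈ pvIdxGo flip (s + 1 + (M.length : Int)) (d :: r'),
            s + (M.length : Int) + 1 < x := by
          intro x hx
          have h3 : pvIdxGo flip (s + 1 + (M.length : Int)) (d :: r')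
              = pvIdxGo flip (s + 1 + (M.length : Int) + 1) r' := by
            simp [pvIdxGo, hdf]
          rw [h3] at hx
          have := pv_idxGo_ge flip r' _ x hx
          omega
        rw [pv_emit_flush s (s + (M.length : Int)) _ hge]
        simp only [pvShout, hcf]
        have he : s + 1 + (M.length : Int) - 1 = s + (M.length : Int) := by ring
        rw [he]
        split_ifs <;> first | rfl | tauto
    · -- run of non-flip caps: nothing collected, nothing shouted
      have hMc : ∀ x ∈ c :: M, x = c := by
        intro x hx
        rcases List.mem_cons.mp hx with h | h
        · exact h
        · exact hM x h
      have h1 : pvIdxGo flip s (c :: (M ++ r)) = pvIdxGo flip (s + 1 + (M.length : Int)) r := by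
        have := pv_idxGo_skip flip c hcf (c :: M) hMc s r
        simp only [List.cons_append] at this ⊢
        rw [this]
        congr 1
        simp only [List.length_cons]
        push_cast
        ring
      rw [h1]
      cases r with
      | nil =>
        have hR : pvIdxGo flip (s + 1 + (M.length : Int)) [] = ([] : List Int) := rfl
        rw [hR]
        by_cases hce : c = "end"
        · simp [pvShoutsGo, hce, pvEmitAll]
        · simp [pvShoutsGo, hce, hcf, pvEmitAll]
      | cons d r' =>
        have hd : (d == c) = false := by
          have h2' := List.head?_dropWhile_not (fun x => x == c) rest
          rw [hrdef] at h2'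
          simpa using h2'
        have hdc : c ≠ d := by intro h; rw [h] at hd; simp at hd
        have hlen' : (d :: r').length ≤ n := by
          have h1' : rest.length = M.length + (d :: r').length := by
            rw [hrest]; simp
          simp only [List.length_cons] at hlen h1' ⊢
          omega
        have hLHS : pvShoutsGo flip s c (s + 1 + (M.length : Int)) ((d :: r') ++ ["end"])
            = pvShoutsGo flip (s + 1 + (M.length : Int)) d (s + 1 + (M.length : Int) + 1)
                (r' ++ ["end"]) := by
          simp [pvShoutsGo, hdc, hcf]
        rw [hLHS, ih d r' hlen' (s + 1 + (M.length : Int))]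

-- B's enumerate-filter-map comprehension computes the structural position list
theorem pv_idx_eq (flip : String) : ∀ (l : List String) (s : Int),
    ((PySem.List.enumerate l s).filter (fun p => p.2 == flip)).map Prod.fst
    = pvIdxGo flip s l := by
  intro l
  induction l with
  | nil => intro s; simp [pvIdxGo, PySem.List.enumerate_nil]
  | cons c t ih =>
    intro s
    rw [PySem.List.enumerate_cons]
    by_cases hc : c = flip
    · simp [hc, pvIdxGo, ih]
    · simp [hc, pvIdxGo, ih]

-- B's fold with an open interval equals the structural gap-merging walk
theorem pv_foldB_some (l : List Int) : ∀ (sh : List String) (a b : Int),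
    (match (l.foldl pvBodyB (sh, some (a, b))).2 with
      | some (x, y) => (l.foldl pvBodyB (sh, some (a, b))).1 ++ [pvShout x y]
      | none => (l.foldl pvBodyB (sh, some (a, b))).1)
    = sh ++ pvEmit a b l := by
  induction l with
  | nil => intro sh a b; simp [pvEmit]
  | cons i t ih =>
    intro sh a b
    simp only [List.foldl_cons, pvBodyB, pvEmit]
    by_cases hi : i = b + 1
    · simp only [hi]
      exact ih sh a (b + 1)
    · simp only [if_neg hi]
      rw [ih (sh ++ [pvShout a b]) i i]
      simp

-- ===== VERDICT (by name: the statement is the Claim_ definition above) =====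
theorem please_flip_one_pass_spec : Claim_equal_please_flip_one_pass := by
  intro caps _
  unfold Spec_please_flip_one_pass
  cases caps with
  | nil => decide
  | cons c t =>
    have hf : (if c = "B" then "F" else "B") ≠ "end" := by split_ifs <;> decide
    have hA0 := pv_loopA (if c = "B" then "F" else "B") (c :: (t ++ ["end"])) (t ++ ["end"])
      [] [] c 1 (by intro x hx; simp at hx) (by simp) (by simp) [] []
    have hA : please_flip_one_pass (c :: t)
        = pvShoutsGo (if c = "B" then "F" else "B") 0 c 1 (t ++ ["end"]) := by
      simp only [please_flip_one_pass, List.cons_append, PySem.List.pyGetD_zero_cons]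
      simpa using hA0
    have hbr := pv_bridge (if c = "B" then "F" else "B") hf (c :: t).length c t (le_refl _) 0
    have hB : please_flip_one_pass_alt (c :: t)
        = pvEmitAll (pvIdxGo (if c = "B" then "F" else "B") 0 (c :: t)) := by
      simp only [please_flip_one_pass_alt]
      rw [pv_idx_eq]
      cases hidx : pvIdxGo (if c = "B" then "F" else "B") 0 (c :: t) with
      | nil => simp [pvEmitAll]
      | cons i t' =>
        simp only [List.foldl_cons, pvBodyB, pvEmitAll]
        exact pv_foldB_some t' [] i i
    rw [hA, hB]
    simpa using hbr
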